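-- pv_equiv track=rewrite | github.com/willdumm/historydag | historydag/parsimony.py | remove_invariant_sites
-- ===== SOURCE A (Python) =====
-- def remove_invariant_sites(fasta_map):
--     """Eliminate invariant characters in a fasta alignment and record the
--     0-based indices of those variant sites."""
--     # eliminate characters for which there's no diversity:
--     informative_sites = [
--         idx for idx, chars in enumerate(zip(*fasta_map.values())) if len(set(chars)) > 1
--     ]
--     newfasta = {
--         key: "".join(oldseq[idx] for idx in informative_sites)
--         for key, oldseq in fasta_map.items()
--     }
--     return newfasta, informative_sites
-- ===== SOURCE B (Python) =====
-- def remove_invariant_sites(fasta_map):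
--     """Eliminate invariant characters in a fasta alignment and record the
--     0-based indices of those variant sites."""
--     keys = list(fasta_map.keys())
--     accs = [[] for _ in keys]
--     sites = []
--     for idx, column in enumerate(zip(*fasta_map.values())):
--         if len(set(column)) > 1:
--             sites.append(idx)
--             for acc, ch in zip(accs, column):
--                 acc.append(ch)
--     newfasta = {key: "".join(acc) for key, acc in zip(keys, accs)}
--     return newfasta, sites
-- ===== Notes on version B (the rewrite author's own statement) =====
-- stated objective: alternative
-- what changed: B fuses variability detection and output construction into one column-wise pass with per-key list accumulators, instead of first computing the variant index list and then re-indexing every sequence row by row.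
import Mathlib
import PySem

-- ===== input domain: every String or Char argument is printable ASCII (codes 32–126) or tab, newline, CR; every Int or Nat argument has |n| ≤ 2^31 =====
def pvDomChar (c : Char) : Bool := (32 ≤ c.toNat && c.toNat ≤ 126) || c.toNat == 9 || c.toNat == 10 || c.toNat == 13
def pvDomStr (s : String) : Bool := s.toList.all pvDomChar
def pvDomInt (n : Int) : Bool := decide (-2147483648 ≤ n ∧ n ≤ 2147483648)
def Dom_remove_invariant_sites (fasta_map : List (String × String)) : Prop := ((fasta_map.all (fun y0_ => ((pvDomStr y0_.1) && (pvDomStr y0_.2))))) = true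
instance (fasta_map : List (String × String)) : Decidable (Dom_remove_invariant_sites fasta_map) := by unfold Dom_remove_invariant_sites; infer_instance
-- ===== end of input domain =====

-- ===== PORT A =====
-- B is an alternative decomposition: one fused column-wise pass with per-key accumulators
-- instead of computing the index list and then re-indexing every sequence row by row.
-- NOTE: both Pythons receive a dict; the association-list argument is normalized by
-- PySem.Dict.ofList (last value wins, first position kept), exactly as Python's dict does.

-- Exact model of Python's zip(*rows): columns up to the shortest row's length
-- (the getD default is never used, since k < every row's length).
def pyZipStar (rows : List (List Char)) : List (List Char) :=
  (List.range (((rows.map List.length).min?).getD 0)).map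
    (fun k => rows.map (fun r => r.getD k ' '))

def remove_invariant_sites (fasta_map : List (String × String)) : (List (String × String)) × List Int :=
  let items := (PySem.Dict.ofList fasta_map).items
  let informative_sites : List Int :=
    (PySem.List.enumerate (pyZipStar (items.map (fun kv => kv.2.toList)))).filterMap
      (fun ic => if 1 < (PySem.Set.ofList ic.2).length then some ic.1 else none)
  (items.map (fun kv =>
      (kv.1, String.ofList (informative_sites.map (fun i => PySem.List.pyGetD kv.2.toList i ' ')))),
   informative_sites)

-- ===== PORT B =====
def remove_invariant_sites_alt (fasta_map : List (String × String)) : (List (String × String)) × List Int :=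
  let items := (PySem.Dict.ofList fasta_map).items
  let keys := items.map (fun kv => kv.1)
  let st := (PySem.List.enumerate (pyZipStar (items.map (fun kv => kv.2.toList)))).foldl
      (fun st ic =>
        if 1 < (PySem.Set.ofList ic.2).length
        then (st.1.zipWith (fun a c => a ++ [c]) ic.2, st.2 ++ [ic.1])
        else st)
      (keys.map (fun _ => ([] : List Char)), ([] : List Int))
  (keys.zip (st.1.map String.ofList), st.2)

-- ===== PRECONDITION & SPEC =====
def Spec_remove_invariant_sites (fasta_map : List (String × String)) (out : (List (String × String)) × List Int) : Prop := out = remove_invariant_sites_alt fasta_map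
instance (fasta_map : List (String × String)) (out : (List (String × String)) × List Int) : Decidable (Spec_remove_invariant_sites fasta_map out) := by unfold Spec_remove_invariant_sites; infer_instance

-- ===== CLAIM (what is proved, stated in full; the proofs are below) =====
def Claim_equal_remove_invariant_sites : Prop := ∀ (fasta_map : List (String × String)), Dom_remove_invariant_sites fasta_map → Spec_remove_invariant_sites fasta_map (remove_invariant_sites fasta_map)

-- ===== LEMMAS AND PROOFS =====

-- the per-column variability test, shared shape of both ports
def pvVar (c : List Char) : Bool := 1 < (PySem.Set.ofList c).length

-- A's comprehension: filterMap with an if = filter then map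
lemma filterMap_if_eq (l : List (Int × List Char)) :
    l.filterMap (fun ic => if 1 < (PySem.Set.ofList ic.2).length then some ic.1 else none)
      = (l.filter (fun ic => pvVar ic.2)).map (fun ic => ic.1) := by
  induction l with
  | nil => rfl
  | cons x t ih =>
    by_cases h : 1 < (PySem.Set.ofList x.2).length <;>
      simp [pvVar, h, ih]

-- B's fused loop, characterized: second component collects the indices of the
-- variable columns; the j-th accumulator collects the j-th character of each.
lemma foldB_char (l : List (Int × List Char)) :
    ∀ (accs : List (List Char)) (sites : List Int),
    (∀ ic ∈ l, ic.2.length = accs.length) →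
    l.foldl
      (fun st ic =>
        if 1 < (PySem.Set.ofList ic.2).length
        then (st.1.zipWith (fun a c => a ++ [c]) ic.2, st.2 ++ [ic.1])
        else st)
      (accs, sites)
    = ((List.range accs.length).map (fun j =>
          accs.getD j [] ++ (l.filter (fun ic => pvVar ic.2)).map (fun ic => ic.2.getD j ' ')),
       sites ++ (l.filter (fun ic => pvVar ic.2)).map (fun ic => ic.1)) := by
  induction l with
  | nil =>
    intro accs sites _
    simp only [List.foldl_nil, List.filter_nil, List.map_nil, List.append_nil]
    congr 1
    apply List.ext_getElem
    · simp
    · intro i h1 h2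
      simp [List.getD_eq_getElem?_getD, h1]
  | cons x t ih =>
    intro accs sites hlen
    have hx : x.2.length = accs.length := hlen x (by simp)
    by_cases h : pvVar x.2
    · have h' : 1 < (PySem.Set.ofList x.2).length := by
        simpa [pvVar] using h
      have hz : (accs.zipWith (fun a c => a ++ [c]) x.2).length = accs.length := by
        simp [List.length_zipWith, hx]
      simp only [List.foldl_cons, if_pos h']
      rw [ih (accs.zipWith (fun a c => a ++ [c]) x.2) (sites ++ [x.1])
            (by intro ic hic; rw [hz]; exact hlen ic (by simp [hic]))]
      rw [hz]
      simp only [List.filter_cons, h, if_pos, List.map_cons, List.append_assoc,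
        List.singleton_append]
      congr 1
      apply List.map_congr_left
      intro j hj
      have hj' : j < accs.length := by simpa using hj
      have hjx : j < x.2.length := by omega
      have : (accs.zipWith (fun a c => a ++ [c]) x.2).getD j []
          = accs.getD j [] ++ [x.2.getD j ' '] := by
        rw [List.getD_eq_getElem?_getD, List.getElem?_eq_getElem (by omega),
            List.getElem_zipWith]
        simp [List.getD_eq_getElem?_getD, hj', hjx]
      rw [this, List.append_assoc, List.singleton_append]
    · have h' : ¬ 1 < (PySem.Set.ofList x.2).length := by
        simpa [pvVar] using h
      simp only [List.foldl_cons, if_neg h']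
      rw [ih accs sites (fun ic hic => hlen ic (by simp [hic]))]
      simp [h]

-- columns of pyZipStar: length and entries
lemma pyZipStar_entry (rows : List (List Char)) (k : Nat)
    (hk : k < (pyZipStar rows).length) :
    (pyZipStar rows)[k] = rows.map (fun r => r.getD k ' ') := by
  simp [pyZipStar] at hk ⊢

lemma pyZipStar_col_len (rows : List (List Char)) (c : List Char)
    (hc : c ∈ pyZipStar rows) : c.length = rows.length := by
  simp only [pyZipStar, List.mem_map, List.mem_range] at hc
  obtain ⟨k, _, rfl⟩ := hc
  simp

-- the core equality, over the normalized items list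
lemma main_items (items : List (String × String)) :
    (items.map (fun kv =>
        (kv.1, String.ofList
          (((PySem.List.enumerate (pyZipStar (items.map (fun kv => kv.2.toList)))).filterMap
              (fun ic => if 1 < (PySem.Set.ofList ic.2).length then some ic.1 else none)).map
            (fun i => PySem.List.pyGetD kv.2.toList i ' ')))),
     (PySem.List.enumerate (pyZipStar (items.map (fun kv => kv.2.toList)))).filterMap
        (fun ic => if 1 < (PySem.Set.ofList ic.2).length then some ic.1 else none))
    =
    ((items.map (fun kv => kv.1)).zip
       (((PySem.List.enumerate (pyZipStar (items.map (fun kv => kv.2.toList)))).foldl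
          (fun st ic =>
            if 1 < (PySem.Set.ofList ic.2).length
            then (st.1.zipWith (fun a c => a ++ [c]) ic.2, st.2 ++ [ic.1])
            else st)
          ((items.map (fun kv => kv.1)).map (fun _ => ([] : List Char)), ([] : List Int))).1.map
         String.ofList),
     ((PySem.List.enumerate (pyZipStar (items.map (fun kv => kv.2.toList)))).foldl
        (fun st ic =>
          if 1 < (PySem.Set.ofList ic.2).length
          then (st.1.zipWith (fun a c => a ++ [c]) ic.2, st.2 ++ [ic.1])
          else st)
        ((items.map (fun kv => kv.1)).map (fun _ => ([] : List Char)), ([] : List Int))).2) := by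
  have hrows : (items.map (fun kv => kv.2.toList)).length = items.length := by simp
  have hlen : ∀ ic ∈ PySem.List.enumerate (pyZipStar (items.map (fun kv => kv.2.toList))),
      (ic : Int × List Char).2.length
        = ((items.map (fun kv => kv.1)).map (fun _ => ([] : List Char))).length := by
    intro ic hic
    rw [PySem.List.mem_enumerate_iff] at hic
    obtain ⟨k, hk, rfl⟩ := hic
    have := pyZipStar_col_len (items.map (fun kv => kv.2.toList))
      ((pyZipStar (items.map (fun kv => kv.2.toList)))[k]) (by simp)
    simpa [hrows] using this
  rw [foldB_char _ _ _ hlen, filterMap_if_eq]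
  set cols := pyZipStar (items.map (fun kv => kv.2.toList)) with hcols
  set fl := (PySem.List.enumerate cols).filter (fun ic => pvVar ic.2) with hfl
  have hmem : ∀ ic ∈ fl, ∃ (k : Nat) (hk : k < cols.length), ic = ((k : Int), cols[k]) := by
    intro ic hic
    have : ic ∈ PySem.List.enumerate cols := List.mem_of_mem_filter hic
    rw [PySem.List.mem_enumerate_iff] at this
    obtain ⟨k, hk, rfl⟩ := this
    exact ⟨k, hk, by simp⟩
  refine Prod.ext ?_ ?_
  · apply List.ext_getElem
    · simp
    · intro i h1 h2
      have hi : i < items.length := by simpa using h1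
      rw [List.getElem_map, List.getElem_zip]
      refine Prod.ext (by simp) ?_
      simp only [List.getElem_map, List.getElem_range]
      have hz : ((items.map (fun kv => kv.1)).map (fun _ => ([] : List Char))).getD i [] = [] := by
        simp [List.getD_eq_getElem?_getD, List.getElem?_eq_getElem hi]
      rw [hz, List.nil_append]
      congr 1
      rw [List.map_map]
      apply List.map_congr_left
      intro ic hic
      obtain ⟨k, hk, rfl⟩ := hmem ic hic
      simp only [Function.comp_apply, PySem.List.pyGetD_natCast]
      rw [pyZipStar_entry _ k hk]
      simp [List.getD_eq_getElem?_getD, List.getElem?_eq_getElem hi]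
  · simp

-- ===== VERDICT (by name: the statement is the Claim_ definition above) =====
theorem remove_invariant_sites_spec : Claim_equal_remove_invariant_sites := by
  intro fasta_map _
  unfold Spec_remove_invariant_sites remove_invariant_sites remove_invariant_sites_alt
  exact main_items ((PySem.Dict.ofList fasta_map).items)
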